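-- pv_equiv track=rewrite | github.com/mnx02/picovoice_manav_chetwani_submission | picovoice_question_1_to_3.py | preprocess_pronunciation_dict
-- ===== SOURCE A (Python) =====
-- from typing import List, Sequence, Dict
--
-- def preprocess_pronunciation_dict(pron_dict: Dict[str, List[str]]) -> Dict[str, List[str]]:
--     phoneme_to_words = {}
--     for word, phonemes in pron_dict.items():
--         phoneme_str = ' '.join(phonemes)
--         if phoneme_str not in phoneme_to_words:
--             phoneme_to_words[phoneme_str] = []
--         phoneme_to_words[phoneme_str].append(word)
--     return phoneme_to_words
-- ===== SOURCE B (Python) =====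
-- def preprocess_pronunciation_dict(pron_dict):
--     pairs = [(' '.join(phonemes), word) for word, phonemes in pron_dict.items()]
--     keys = list(dict.fromkeys(p for p, _ in pairs))
--     return {k: [w for p, w in pairs if p == k] for k in keys}
-- ===== Notes on version B (the rewrite author's own statement) =====
-- stated objective: alternative
-- what changed: A builds the grouping in one pass by mutating a dict (insert-if-missing then append); B instead maps the input to (phoneme_str, word) pairs, dedups the keys in first-occurrence order, and gathers each group with a comprehension scan over the pairs.
import Mathlib
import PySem

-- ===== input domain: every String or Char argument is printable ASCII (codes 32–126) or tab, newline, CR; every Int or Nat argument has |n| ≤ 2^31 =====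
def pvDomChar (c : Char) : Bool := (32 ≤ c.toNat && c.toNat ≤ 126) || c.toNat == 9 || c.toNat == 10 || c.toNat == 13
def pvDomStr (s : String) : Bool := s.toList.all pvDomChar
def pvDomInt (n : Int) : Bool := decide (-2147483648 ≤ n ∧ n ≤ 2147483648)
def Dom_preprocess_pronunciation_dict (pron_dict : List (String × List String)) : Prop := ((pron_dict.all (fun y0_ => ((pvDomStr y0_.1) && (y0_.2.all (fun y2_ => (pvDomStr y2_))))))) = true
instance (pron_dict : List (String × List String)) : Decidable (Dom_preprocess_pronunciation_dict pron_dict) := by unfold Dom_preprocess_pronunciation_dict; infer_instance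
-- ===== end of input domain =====

-- B replaces A's single mutating-dict pass by a map / ordered-dedup / gather decomposition (alternative, not faster).


-- ===== PORT A =====
-- single pass: for each (word, phonemes), ensure the key ' '.join(phonemes) exists, then append word
def preprocess_pronunciation_dict (pron_dict : List (String × List String)) : List (String × List String) :=
  (pron_dict.foldl
    (fun (d : PySem.Dict String (List String)) wp =>
      let phoneme_str := PySem.Str.join " " wp.2
      let d := if d.contains phoneme_str then d else d.insert phoneme_str []
      d.modify phoneme_str [] (fun ws => ws ++ [wp.1]))
    PySem.Dict.empty).items

-- ===== PORT B =====
-- map to (phoneme_str, word) pairs, dedup keys in first-occurrence order, gather each group by a scan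
def preprocess_pronunciation_dict_alt (pron_dict : List (String × List String)) : List (String × List String) :=
  let pairs := pron_dict.map (fun wp => (PySem.Str.join " " wp.2, wp.1))
  let keys := PySem.List.dedup (pairs.map (·.1))
  keys.map (fun k => (k, (pairs.filter (fun p => p.1 == k)).map (·.2)))

-- ===== PRECONDITION & SPEC =====
def Spec_preprocess_pronunciation_dict (pron_dict : List (String × List String)) (out : List (String × List String)) : Prop := out = preprocess_pronunciation_dict_alt pron_dict
instance (pron_dict : List (String × List String)) (out : List (String × List String)) : Decidable (Spec_preprocess_pronunciation_dict pron_dict out) := by unfold Spec_preprocess_pronunciation_dict; infer_instance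

-- ===== CLAIM (what is proved, stated in full; the proofs are below) =====
def Claim_equal_preprocess_pronunciation_dict : Prop := ∀ (pron_dict : List (String × List String)), Dom_preprocess_pronunciation_dict pron_dict → Spec_preprocess_pronunciation_dict pron_dict (preprocess_pronunciation_dict pron_dict)

-- ===== LEMMAS AND PROOFS =====

-- A's loop body (insert-if-missing, then append) is the plain modify-append step
theorem pv_step_eq (d : PySem.Dict String (List String)) (ps w : String) :
    ((if d.contains ps then d else d.insert ps []).modify ps [] (fun ws => ws ++ [w]))
      = d.modify ps [] (fun ws => ws ++ [w]) := by
  by_cases h : d.contains ps = true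
  · simp [h]
  · simp only [h]
    show (d.insert ps []).insert ps ((d.insert ps []).getD ps [] ++ [w])
        = d.insert ps (d.getD ps [] ++ [w])
    rw [PySem.Dict.getD_insert_self, PySem.Dict.insert_insert_self]
    simp [PySem.Dict.getD_of_not_contains, h]

-- A's fold over the input is the modify-append fold over B's pairs list
theorem pv_fold_eq (pron_dict : List (String × List String)) :
    (pron_dict.foldl
      (fun (d : PySem.Dict String (List String)) wp =>
        let phoneme_str := PySem.Str.join " " wp.2
        let d := if d.contains phoneme_str then d else d.insert phoneme_str []
        d.modify phoneme_str [] (fun ws => ws ++ [wp.1]))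
      PySem.Dict.empty)
    = ((pron_dict.map (fun wp => (PySem.Str.join " " wp.2, wp.1))).foldl
        (fun (d : PySem.Dict String (List String)) p => d.modify p.1 [] (fun ws => ws ++ [p.2]))
        PySem.Dict.empty) := by
  rw [List.foldl_map]
  exact PySem.List.foldl_congr_mem _ _ _ _ (fun d wp _ => pv_step_eq d (PySem.Str.join " " wp.2) wp.1)

-- ===== VERDICT (by name: the statement is the Claim_ definition above) =====
theorem preprocess_pronunciation_dict_spec : Claim_equal_preprocess_pronunciation_dict := by
  intro pron_dict _
  show preprocess_pronunciation_dict pron_dict = preprocess_pronunciation_dict_alt pron_dict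
  unfold preprocess_pronunciation_dict preprocess_pronunciation_dict_alt
  rw [pv_fold_eq]
  set pairs := pron_dict.map (fun wp => (PySem.Str.join " " wp.2, wp.1)) with hpairs
  set D := pairs.foldl
      (fun (d : PySem.Dict String (List String)) p => d.modify p.1 [] (fun ws => ws ++ [p.2]))
      PySem.Dict.empty with hD
  have hkeys : D.keys = PySem.List.dedup (pairs.map (·.1)) := by
    rw [hD, PySem.Dict.keys_foldl_modify_key]
    rfl
  have hnd : D.keys.Nodup := by
    rw [hD]
    exact PySem.Dict.nodup_keys_foldl_modify_key pairs _ _ _ _ PySem.Dict.nodup_keys_empty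
  have hget : ∀ k, D.getD k [] = (pairs.filter (fun p => p.1 == k)).map (·.2) := by
    intro k
    rw [hD, PySem.Dict.getD_foldl_modify_append]
    simp [PySem.Dict.getD_empty]
  rw [PySem.Dict.items_eq_map_keys D hnd [], hkeys]
  exact List.map_congr_left (fun k _ => by rw [hget k])
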